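-- pv_equiv track=rewrite | github.com/Jester6136/MNER-Vietnamese | modules/datasets/convert_to_word_from_syllable_conll2.py | simplify_labels
-- ===== SOURCE A (Python) =====
-- def simplify_labels(labels):
--     if not labels:
--         return None
--
--     # Check if all labels are 'O'
--     if all(label == 'O' for label in labels):
--         return 'O'
--
--     # Check for 'B-' or 'I-' prefixes and return the corresponding label
--     for label in labels:
--         if label.startswith('B-') or label.startswith('I-'):
--             return label
--
--     # If no 'B-' or 'I-' prefixes are found, return the first label
--     return labels[0]
-- ===== SOURCE B (Python) =====
-- def simplify_labels(labels):
--     if not labels: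
--         return None
--     # The all-'O' pass in the original is redundant: if every label is 'O',
--     # labels[0] is 'O' itself, so "first B-/I- label, else labels[0]" already
--     # yields 'O' there.
--     return next((l for l in labels if l.startswith(('B-', 'I-'))), labels[0])
-- ===== Notes on version B (the rewrite author's own statement) =====
-- stated objective: simpler
-- what changed: Dropped A's all-'O' pass entirely (when every label is 'O', labels[0] is already 'O'), reducing the function to a single next() search for the first B-/I- label with labels[0] as default.
import Mathlib
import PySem

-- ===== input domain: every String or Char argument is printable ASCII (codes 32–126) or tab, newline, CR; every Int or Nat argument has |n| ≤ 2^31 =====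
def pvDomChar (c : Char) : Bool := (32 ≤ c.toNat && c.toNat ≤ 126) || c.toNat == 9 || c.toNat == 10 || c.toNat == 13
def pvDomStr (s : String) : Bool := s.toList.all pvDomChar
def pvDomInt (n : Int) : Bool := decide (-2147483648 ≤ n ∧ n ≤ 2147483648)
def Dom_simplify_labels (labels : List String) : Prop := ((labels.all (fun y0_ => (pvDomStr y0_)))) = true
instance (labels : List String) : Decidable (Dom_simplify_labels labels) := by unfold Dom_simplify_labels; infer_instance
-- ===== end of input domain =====

-- B removes A's redundant all-'O' pass (when every label is 'O', labels[0] is already 'O') and is just the first-B-/I--label search with labels[0] as default (simpler).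


-- ===== PORT A =====
def pvIsBI (l : String) : Bool :=
  PySem.Str.startswith l "B-" || PySem.Str.startswith l "I-"

-- A's prefix-search loop: return the first label starting with 'B-' or 'I-'
def pvFindBI : List String → Option String
  | [] => none
  | l :: rest => if pvIsBI l then some l else pvFindBI rest

def simplify_labels (labels : List String) : Option String :=
  if labels.isEmpty then none
  else if labels.all (fun l => l == "O") then some "O"
  else match pvFindBI labels with
       | some l => some l
       | none => PySem.List.pyGet? labels 0

-- ===== PORT B =====
-- Source B: next((l for l in labels if l.startswith(('B-','I-'))), labels[0])
def simplify_labels_alt (labels : List String) : Option String :=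
  match labels with
  | [] => none
  | l0 :: _ => some ((labels.find? pvIsBI).getD l0)

-- ===== PRECONDITION & SPEC =====
def Spec_simplify_labels (labels : List String) (out : Option String) : Prop := out = simplify_labels_alt labels
instance (labels : List String) (out : Option String) : Decidable (Spec_simplify_labels labels out) := by unfold Spec_simplify_labels; infer_instance

-- ===== CLAIM (what is proved, stated in full; the proofs are below) =====
def Claim_equal_simplify_labels : Prop := ∀ (labels : List String), Dom_simplify_labels labels → Spec_simplify_labels labels (simplify_labels labels)

-- ===== LEMMAS AND PROOFS =====


-- ===== VERDICT (by name: the statement is the Claim_ definition above) =====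
theorem pvFindBI_eq_find? (labels : List String) : pvFindBI labels = labels.find? pvIsBI := by
  induction labels with
  | nil => rfl
  | cons h t ih => by_cases hb : pvIsBI h <;> simp [pvFindBI, hb, ih]

theorem simplify_labels_spec : Claim_equal_simplify_labels := by
  intro labels _
  unfold Spec_simplify_labels simplify_labels simplify_labels_alt
  cases labels with
  | nil => rfl
  | cons l0 t =>
    simp only [List.isEmpty_cons, Bool.false_eq_true, if_false, pvFindBI_eq_find?]
    by_cases hall : (l0 :: t).all (fun l => l == "O") = true
    · -- all 'O': find? fails (since "O" is not B-/I-) and l0 = "O"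
      have hl0 : l0 = "O" := by
        have := (List.all_cons .. ▸ hall); simpa using (Bool.and_elim_left this)
      have hf : (l0 :: t).find? pvIsBI = none := by
        rw [List.find?_eq_none]
        intro x hx
        have : x = "O" := by
          have := List.all_eq_true.mp hall x hx; simpa using this
        subst this; decide
      subst hl0
      rw [hf]
      simp [hall]
    · simp only [hall]
      cases hf : (l0 :: t).find? pvIsBI <;>
        simp [PySem.List.pyGet?, PySem.List.pyIdx?]
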